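-- pv_equiv track=rewrite | github.com/tsembp/Hitting-Set-Problem | script1.py | is_hitting_set
-- ===== SOURCE A (Python) =====
-- def is_hitting_set(subsets, candidate_set):
--     """Check if the candidate set hits all subsets"""
--     for subset in subsets:
--         hit = False
--         for element in candidate_set:
--             if element in subset:
--                 hit = True
--                 break
--         if not hit:
--             return False
--     return True
-- ===== SOURCE B (Python) =====
-- def is_hitting_set(subsets, candidate_set):
--     """Check if the candidate set hits all subsets"""
--     index = {}
--     for i, subset in enumerate(subsets):
--         for element in subset:
--             index.setdefault(element, set()).add(i)
--     hit = set()
--     for element in candidate_set: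
--         hit |= index.get(element, set())
--     return len(hit) == len(subsets)
-- ===== Notes on version B (the rewrite author's own statement) =====
-- stated objective: alternative
-- what changed: Instead of rescanning the candidate list once per subset, B builds an inverted index from each element to the set of subset indices containing it, then unions the index entries of the candidate elements and compares the count of hit indices with the number of subsets.
import Mathlib
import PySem

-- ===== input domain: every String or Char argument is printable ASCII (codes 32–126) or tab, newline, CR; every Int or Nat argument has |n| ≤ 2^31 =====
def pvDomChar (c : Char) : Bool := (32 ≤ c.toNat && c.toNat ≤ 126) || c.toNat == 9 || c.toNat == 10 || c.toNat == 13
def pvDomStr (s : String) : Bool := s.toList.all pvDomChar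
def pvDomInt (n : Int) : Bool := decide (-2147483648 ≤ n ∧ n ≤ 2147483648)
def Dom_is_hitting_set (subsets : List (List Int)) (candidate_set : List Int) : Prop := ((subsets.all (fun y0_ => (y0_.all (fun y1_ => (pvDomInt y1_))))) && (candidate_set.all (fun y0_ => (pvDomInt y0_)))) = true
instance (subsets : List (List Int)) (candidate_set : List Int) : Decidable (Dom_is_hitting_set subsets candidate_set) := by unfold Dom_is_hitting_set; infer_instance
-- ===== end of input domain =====

-- B replaces A's rescanning of the candidate list per subset by an inverted index
-- (element -> set of subset indices), unioning index entries over the candidate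
-- elements and comparing the number of hit indices with the number of subsets
-- (objective: an alternative algorithm, one pass over the data).

-- ===== PORT A =====
-- inner 'for element in candidate_set: if element in subset: hit = True; break'
def pvHitLoop (subset : List Int) (candidate_set : List Int) : Bool :=
  match candidate_set with
  | [] => false
  | e :: rest => if subset.contains e then true else pvHitLoop subset rest

def is_hitting_set (subsets : List (List Int)) (candidate_set : List Int) : Bool :=
  match subsets with
  | [] => true
  | s :: rest =>
      if !(pvHitLoop s candidate_set) then false
      else is_hitting_set rest candidate_set

-- ===== PORT B =====
-- 'for i, subset in enumerate(subsets): for element in subset: index.setdefault(element, set()).add(i)'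
-- (setdefault(k, set()).add(i) stores back the grown set: modeled as Dict.modify k ∅ (·.add i))
def pvBuildIndex (subsets : List (List Int)) : PySem.Dict Int (PySem.Set Int) :=
  (PySem.List.enumerate subsets).foldl
    (fun d p => p.2.foldl
      (fun d e => d.modify e PySem.Set.empty (fun s => PySem.Set.add s p.1)) d)
    PySem.Dict.empty

def is_hitting_set_alt (subsets : List (List Int)) (candidate_set : List Int) : Bool :=
  let index := pvBuildIndex subsets
  let hit : PySem.Set Int :=
    candidate_set.foldl
      (fun h e => PySem.Set.union h (index.getD e PySem.Set.empty)) PySem.Set.empty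
  decide (hit.length = subsets.length)

-- ===== PRECONDITION & SPEC =====
def Spec_is_hitting_set (subsets : List (List Int)) (candidate_set : List Int) (out : Bool) : Prop := out = is_hitting_set_alt subsets candidate_set
instance (subsets : List (List Int)) (candidate_set : List Int) (out : Bool) : Decidable (Spec_is_hitting_set subsets candidate_set out) := by unfold Spec_is_hitting_set; infer_instance

-- ===== CLAIM (what is proved, stated in full; the proofs are below) =====
def Claim_equal_is_hitting_set : Prop := ∀ (subsets : List (List Int)) (candidate_set : List Int), Dom_is_hitting_set subsets candidate_set → Spec_is_hitting_set subsets candidate_set (is_hitting_set subsets candidate_set)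

-- ===== LEMMAS AND PROOFS =====

-- A's inner loop finds a candidate element in the subset
theorem pvHitLoop_iff (s cand : List Int) :
    pvHitLoop s cand = true ↔ ∃ e ∈ cand, e ∈ s := by
  induction cand with
  | nil => simp [pvHitLoop]
  | cons e rest ih =>
      by_cases h : e ∈ s <;> simp [pvHitLoop, h, ih]

-- A is the conjunction over subsets
theorem is_hitting_set_iff (ss : List (List Int)) (cand : List Int) :
    is_hitting_set ss cand = true ↔ ∀ s ∈ ss, ∃ e ∈ cand, e ∈ s := by
  induction ss with
  | nil => simp [is_hitting_set]
  | cons s rest ih =>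
      by_cases h : pvHitLoop s cand = true
      · simp [is_hitting_set, h, ih, (pvHitLoop_iff s cand).mp h]
      · simp only [is_hitting_set, h]
        simp only [pvHitLoop_iff] at h
        simp [h]
  
-- inner index loop: what ends up in the bucket of key k
theorem pvInner_getD (sub : List Int) (i : Int) (d : PySem.Dict Int (PySem.Set Int))
    (k : Int) (x : Int) :
    x ∈ (sub.foldl (fun d e => d.modify e PySem.Set.empty (fun s => PySem.Set.add s i)) d).getD k PySem.Set.empty
      ↔ x ∈ d.getD k PySem.Set.empty ∨ (k ∈ sub ∧ x = i) := by
  induction sub generalizing d with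
  | nil => simp
  | cons e rest ih =>
      simp only [List.foldl_cons, ih, PySem.Dict.getD_modify]
      by_cases h : k = e
      · simp [h, PySem.Set.mem_add]
        tauto
      · simp [h]

-- outer index loop over the enumerated subsets
theorem pvOuter_getD (l : List (Int × List Int)) (d : PySem.Dict Int (PySem.Set Int))
    (k : Int) (x : Int) :
    x ∈ (l.foldl (fun d p => p.2.foldl
          (fun d e => d.modify e PySem.Set.empty (fun s => PySem.Set.add s p.1)) d) d).getD k PySem.Set.empty
      ↔ x ∈ d.getD k PySem.Set.empty ∨ ∃ p ∈ l, k ∈ p.2 ∧ x = p.1 := by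
  induction l generalizing d with
  | nil => simp
  | cons p rest ih =>
      simp only [List.foldl_cons, ih, pvInner_getD]
      simp
      tauto

-- index bucket of k = the indices of the subsets containing k
theorem pvBuildIndex_getD (ss : List (List Int)) (k x : Int) :
    x ∈ (pvBuildIndex ss).getD k PySem.Set.empty
      ↔ ∃ j : Nat, ∃ h : j < ss.length, k ∈ ss[j] ∧ x = (j : Int) := by
  simp only [pvBuildIndex, pvOuter_getD, PySem.Dict.getD_empty,
    PySem.List.mem_enumerate_iff]
  constructor
  · rintro (h | ⟨p, ⟨j, hj, rfl⟩, hk, hx⟩)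
    · simp [PySem.Set.empty] at h
    · exact ⟨j, hj, by simpa using hk, by simpa using hx⟩
  · rintro ⟨j, hj, hk, hx⟩
    exact Or.inr ⟨((j : Int), ss[j]), ⟨j, hj, by simp⟩, hk, hx⟩

-- hit-set loop: member iff some candidate's bucket contains it
theorem pvHit_mem (index : PySem.Dict Int (PySem.Set Int)) (cand : List Int)
    (acc : PySem.Set Int) (x : Int) :
    x ∈ cand.foldl (fun h e => PySem.Set.union h (index.getD e PySem.Set.empty)) acc
      ↔ x ∈ acc ∨ ∃ e ∈ cand, x ∈ index.getD e PySem.Set.empty := by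
  induction cand generalizing acc with
  | nil => simp
  | cons e rest ih =>
      simp only [List.foldl_cons, ih, PySem.Set.mem_union]
      simp
      tauto

theorem pvHit_nodup (index : PySem.Dict Int (PySem.Set Int)) (cand : List Int)
    (acc : PySem.Set Int) (h : acc.Nodup) :
    (cand.foldl (fun h e => PySem.Set.union h (index.getD e PySem.Set.empty)) acc).Nodup := by
  induction cand generalizing acc with
  | nil => exact h
  | cons e rest ih => exact ih _ (PySem.Set.nodup_union _ _ h)

-- the hit set collects exactly the indices of subsets met by some candidate element
theorem pvHit_char (ss : List (List Int)) (cand : List Int) (x : Int) :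
    x ∈ cand.foldl (fun h e => PySem.Set.union h ((pvBuildIndex ss).getD e PySem.Set.empty)) PySem.Set.empty
      ↔ ∃ j : Nat, ∃ h : j < ss.length, (∃ e ∈ cand, e ∈ ss[j]) ∧ x = (j : Int) := by
  simp only [pvHit_mem, pvBuildIndex_getD]
  constructor
  · rintro (h | ⟨e, he, j, hj, hk, rfl⟩)
    · simp [PySem.Set.empty] at h
    · exact ⟨j, hj, ⟨e, he, hk⟩, rfl⟩
  · rintro ⟨j, hj, ⟨e, he, hk⟩, rfl⟩
    exact Or.inr ⟨e, he, j, hj, hk, rfl⟩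

-- the two programs agree everywhere
theorem pvMain (ss : List (List Int)) (cand : List Int) :
    is_hitting_set ss cand = is_hitting_set_alt ss cand := by
  have hiff : (is_hitting_set ss cand = true) ↔ (is_hitting_set_alt ss cand = true) := by
    rw [is_hitting_set_iff]
    simp only [is_hitting_set_alt, decide_eq_true_eq]
    set hit := cand.foldl
      (fun h e => PySem.Set.union h ((pvBuildIndex ss).getD e PySem.Set.empty)) PySem.Set.empty with hhit
    set T : List Int := ((List.range ss.length).filter
      (fun j => decide (∃ e ∈ cand, e ∈ ss[j]!))).map (fun j => ((j : Nat) : Int)) with hT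
    have hTmem : ∀ x, x ∈ T ↔
        ∃ j : Nat, ∃ h : j < ss.length, (∃ e ∈ cand, e ∈ ss[j]) ∧ x = (j : Int) := by
      intro x
      simp only [hT, List.mem_map, List.mem_filter, List.mem_range, decide_eq_true_eq]
      constructor
      · rintro ⟨j, ⟨hj, hp⟩, rfl⟩
        rw [getElem!_pos ss j hj] at hp
        exact ⟨j, hj, hp, rfl⟩
      · rintro ⟨j, hj, hp, rfl⟩
        refine ⟨j, ⟨hj, ?_⟩, rfl⟩
        rw [getElem!_pos ss j hj]
        exact hp
    have hTnodup : T.Nodup := by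
      refine List.Nodup.map (fun a b hab => ?_) (List.Nodup.filter _ List.nodup_range)
      exact_mod_cast hab
    have hnodup : hit.Nodup := pvHit_nodup _ _ _ (by simp [PySem.Set.empty])
    have hperm : hit.Perm T :=
      (List.perm_ext_iff_of_nodup hnodup hTnodup).mpr
        (fun x => (pvHit_char ss cand x).trans (hTmem x).symm)
    have hlen : hit.length = T.length := hperm.length_eq
    rw [hlen]
    have hfl : T.length =
        ((List.range ss.length).filter (fun j => decide (∃ e ∈ cand, e ∈ ss[j]!))).length := by
      simp [hT]
    constructor
    · intro hall
      rw [hfl]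
      have : ((List.range ss.length).filter
          (fun j => decide (∃ e ∈ cand, e ∈ ss[j]!))) = List.range ss.length := by
        apply List.filter_eq_self.mpr
        intro j hj
        rw [List.mem_range] at hj
        rw [decide_eq_true_eq, getElem!_pos ss j hj]
        exact hall ss[j] (List.getElem_mem hj)
      rw [this, List.length_range]
    · intro hlen' s hs
      have heq : ((List.range ss.length).filter
          (fun j => decide (∃ e ∈ cand, e ∈ ss[j]!))) = List.range ss.length :=
        List.Sublist.eq_of_length List.filter_sublist
          (by rw [← hfl, hlen', List.length_range])
      obtain ⟨j, hj, rfl⟩ := List.mem_iff_getElem.mp hs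
      have hjmem : j ∈ List.range ss.length := List.mem_range.mpr hj
      rw [← heq] at hjmem
      have := (List.mem_filter.mp hjmem).2
      rw [decide_eq_true_eq, getElem!_pos ss j hj] at this
      exact this
  revert hiff
  cases is_hitting_set ss cand <;> cases is_hitting_set_alt ss cand <;> simp

-- ===== VERDICT (by name: the statement is the Claim_ definition above) =====
theorem is_hitting_set_spec : Claim_equal_is_hitting_set := by
  intro ss cand _
  unfold Spec_is_hitting_set
  exact pvMain ss cand
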